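-- pv_equiv track=rewrite | github.com/39world/KTC_algorithm | SangGu/인사고과.py | solution
-- ===== SOURCE A (Python) =====
-- def solution(scores):
--     answer = 0
--     target = sum(scores[0])
--     targetList = []
--     targetList.append(target)
--
--     if any(score[0] > scores[0][0] and score[1] > scores[0][1] for score in scores): #완호점수 확인
--         return -1
--     scores.sort(key=lambda x:(-x[0],x[1]))
--
--     lowScore = 0 #못받는 사람 제외해
--     for score in scores:
--         if lowScore <= score[1]:
--             lowScore = score[1]
--             if sum(score) > target:
--                 answer += 1
--
--     return answer+1
-- ===== SOURCE B (Python) =====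
-- # Alternative: no sort, no running state -- count globally undominated employees
-- # with a strictly greater total, in one all-pairs scan over the unsorted list.
-- # Note: A sorts `scores` in place; B leaves the argument untouched (return value
-- # equivalence only). B also counts undominated employees with negative second
-- # scores, which A's lowScore=0 initialisation silently drops (see D_).
-- def solution(scores):
--     x0, y0 = scores[0]
--     if any(a > x0 and b > y0 for a, b in scores):
--         return -1
--     target = x0 + y0
--     return 1 + sum(
--         1
--         for a, b in scores
--         if a + b > target and not any(c > a and d > b for c, d in scores)
--     )
-- ===== Notes on version B (the rewrite author's own statement) =====
-- stated objective: alternative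
-- what changed: B drops the sort and the running-max single pass entirely and instead counts, in one all-pairs scan over the unsorted list, the employees that no other employee strictly beats in both scores and whose total strictly exceeds the target's total (A additionally mutates its argument by sorting in place; B does not).
-- intended difference: On inputs whose first employee is undominated but which contain an undominated employee with a NEGATIVE second score and a total strictly above the target's, A's lowScore=0 initialisation silently skips that employee and returns a rank that is too low, while B counts every undominated better-total employee, which is the intended ranking. — e.g. on solution([(1, 1), (5, -1)]): A returns 1, B returns 2
import Mathlib
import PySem

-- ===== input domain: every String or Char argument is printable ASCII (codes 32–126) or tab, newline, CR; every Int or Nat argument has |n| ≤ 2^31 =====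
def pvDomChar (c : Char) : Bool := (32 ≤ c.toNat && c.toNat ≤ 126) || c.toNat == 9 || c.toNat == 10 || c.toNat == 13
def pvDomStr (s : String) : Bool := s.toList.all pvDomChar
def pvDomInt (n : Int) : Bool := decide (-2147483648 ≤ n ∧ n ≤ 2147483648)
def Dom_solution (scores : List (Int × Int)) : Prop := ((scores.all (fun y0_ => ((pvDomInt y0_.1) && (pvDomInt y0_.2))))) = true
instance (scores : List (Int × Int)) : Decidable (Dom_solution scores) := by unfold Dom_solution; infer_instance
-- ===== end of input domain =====

-- B counts undominated better-total employees in one all-pairs scan over the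
-- UNSORTED list (A mutates its argument by sorting in place; B does not — the
-- equivalence proved here is about the return value only).

-- ===== PORT A =====
def solution (scores : List (Int × Int)) : Int :=
  match PySem.List.pyGet? scores 0 with
  | none => 0  -- scores[0] raises IndexError on []; excluded by Pre_solution
  | some s0 =>
    let target := s0.1 + s0.2
    -- (A also builds an unused targetList; dead code, not ported)
    if scores.any (fun sc => decide (sc.1 > s0.1) && decide (sc.2 > s0.2)) then
      (-1 : Int)
    else
      let t := PySem.List.sorted2 scores (fun x => -x.1) (fun x => x.2)
      let st := t.foldl
        (fun (st : Int × Int) sc =>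
          if st.1 ≤ sc.2 then
            (sc.2, if sc.1 + sc.2 > target then st.2 + 1 else st.2)
          else st) ((0 : Int), (0 : Int))
      st.2 + 1

-- ===== PORT B =====
def solution_alt (scores : List (Int × Int)) : Int :=
  match scores with
  | [] => 0  -- scores[0] raises IndexError on []; excluded by Pre_solution
  | s0 :: _ =>
    if scores.any (fun sc => decide (sc.1 > s0.1) && decide (sc.2 > s0.2)) then
      (-1 : Int)
    else
      let target := s0.1 + s0.2
      1 + ((scores.countP (fun p =>
              decide (p.1 + p.2 > target) &&
              !(scores.any (fun z => decide (z.1 > p.1) && decide (z.2 > p.2))))) : Int)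

-- ===== PRECONDITION & SPEC =====
-- A (and B) evaluate scores[0]: both raise IndexError on the empty list.
def Pre_solution (scores : List (Int × Int)) : Prop := scores ≠ []
instance (scores : List (Int × Int)) : Decidable (Pre_solution scores) := by
  unfold Pre_solution; infer_instance
def pvWitness_solution : (List (Int × Int)) := [(1, 1)]

-- On inputs whose first employee is undominated but which contain an undominated
-- employee with a NEGATIVE second score and a total strictly above the first
-- employee's, A's lowScore=0 initialisation silently skips that employee and
-- returns a rank that is too low; B counts every undominated better-total
-- employee, which is the intended ranking.
def D_solution (scores : List (Int × Int)) : Prop :=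
  ∃ s0 ∈ scores.take 1,
    (∀ z ∈ scores, ¬(z.1 > s0.1 ∧ z.2 > s0.2)) ∧
    ∃ s ∈ scores, s.2 < 0 ∧ s.1 + s.2 > s0.1 + s0.2 ∧
      ∀ z ∈ scores, ¬(z.1 > s.1 ∧ z.2 > s.2)
instance (scores : List (Int × Int)) : Decidable (D_solution scores) := by
  unfold D_solution; infer_instance

def Spec_solution (scores : List (Int × Int)) (out : Int) : Prop :=
  ¬ D_solution scores → out = solution_alt scores
instance (scores : List (Int × Int)) (out : Int) : Decidable (Spec_solution scores out) := by
  unfold Spec_solution; infer_instance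

def pvDiffWitness_solution : (List (Int × Int)) := [(1, 1), (5, -1)]
def pvDiffWitnessOut_solution : Int × Int := (1, 2)

-- ===== CLAIM (what is proved, stated in full; the proofs are below) =====
def Claim_unchanged_solution : Prop := ∀ (scores : List (Int × Int)), Dom_solution scores → Pre_solution scores → Spec_solution scores (solution scores)
def Claim_changed_solution : Prop := Dom_solution (pvDiffWitness_solution) ∧ Pre_solution (pvDiffWitness_solution) ∧ D_solution (pvDiffWitness_solution) ∧ solution (pvDiffWitness_solution) = pvDiffWitnessOut_solution.1 ∧ solution_alt (pvDiffWitness_solution) = pvDiffWitnessOut_solution.2 ∧ pvDiffWitnessOut_solution.1 ≠ pvDiffWitnessOut_solution.2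
def Claim_exact_solution : Prop := ∀ (scores : List (Int × Int)), Dom_solution scores → Pre_solution scores → D_solution scores → solution scores ≠ solution_alt scores

-- ===== LEMMAS AND PROOFS =====


lemma decide_and_false {p q : Prop} [Decidable p] [Decidable q]
    (h : ¬((decide p && decide q) = true)) : ¬(p ∧ q) := by
  rintro ⟨hp, hq⟩; simp [hp, hq] at h

lemma decide_and_false_of_not {p q : Prop} [Decidable p] [Decidable q]
    (h : ¬(p ∧ q)) : ¬((decide p && decide q) = true) := by
  by_cases hp : p
  · by_cases hq : q
    · exact absurd ⟨hp, hq⟩ h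
    · simp [hq]
  · simp [hp]

-- the boolean comparison PySem's sorted2 uses for the key pair (-fst, snd)
def bef (a b : Int × Int) : Bool :=
  decide (-a.1 < -b.1) || (!decide (-b.1 < -a.1) && decide (a.2 < b.2))

-- what the sorted order guarantees between an earlier element a and a later b
def Rord (a b : Int × Int) : Prop := b.1 ≤ a.1 ∧ (b.1 < a.1 ∨ a.2 ≤ b.2)

lemma bef_false_Rord {a b : Int × Int} (h : bef b a = false) : Rord a b := by
  simp only [bef, Bool.or_eq_false_iff, Bool.and_eq_false_iff, Bool.not_eq_false',
    decide_eq_false_iff_not, decide_eq_true_eq, Rord] at *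
  omega

lemma bef_asymm {a b : Int × Int} (h : bef a b = true) : bef b a = false := by
  simp only [bef, Bool.or_eq_true, Bool.and_eq_true, Bool.not_eq_true',
    Bool.or_eq_false_iff, Bool.and_eq_false_iff, Bool.not_eq_false',
    decide_eq_false_iff_not, decide_eq_true_eq] at *
  omega

lemma bef_trans {a b c : Int × Int} (h1 : bef a b = true) (h2 : bef b c = true) :
    bef a c = true := by
  simp only [bef, Bool.or_eq_true, Bool.and_eq_true, Bool.not_eq_true',
    decide_eq_false_iff_not, decide_eq_true_eq] at *
  omega

lemma insertBy_pairwise_bef (x : Int × Int) (ys : List (Int × Int))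
    (h : ys.Pairwise (fun a b => bef b a = false)) :
    (PySem.List.insertBy bef x ys).Pairwise (fun a b => bef b a = false) := by
  induction ys with
  | nil => simp [PySem.List.insertBy]
  | cons y ys ih =>
    rcases List.pairwise_cons.mp h with ⟨hy, hys⟩
    by_cases hb : bef x y = true
    · simp only [PySem.List.insertBy, hb, if_true]
      refine List.pairwise_cons.mpr ⟨?_, h⟩
      intro z hz
      rcases List.mem_cons.mp hz with rfl | hz'
      · exact bef_asymm hb
      · by_cases hzx : bef z x = true
        · have := bef_trans hzx hb
          have h0 := hy z hz'
          simp [this] at h0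
        · simpa using hzx
    · simp only [PySem.List.insertBy, hb, if_false]
      refine List.pairwise_cons.mpr ⟨?_, ih hys⟩
      intro z hz
      rcases (PySem.List.mem_insertBy bef x z ys).mp hz with rfl | hz'
      · simpa using hb
      · exact hy z hz'

lemma foldl_insertBy_pairwise_bef (xs : List (Int × Int)) :
    ∀ acc : List (Int × Int), acc.Pairwise (fun a b => bef b a = false) →
      (xs.foldl (fun acc x => PySem.List.insertBy bef x acc) acc).Pairwise
        (fun a b => bef b a = false) := by
  induction xs with
  | nil => intro acc h; simpa using h
  | cons x xs ih => intro acc h; exact ih _ (insertBy_pairwise_bef x acc h)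

lemma sorted2_pairwise_Rord (scores : List (Int × Int)) :
    (PySem.List.sorted2 scores (fun x => -x.1) (fun x => x.2)).Pairwise Rord := by
  have h : PySem.List.sorted2 scores (fun x => -x.1) (fun x => x.2) =
      scores.foldl (fun acc x => PySem.List.insertBy bef x acc) [] := rfl
  rw [h]
  exact (foldl_insertBy_pairwise_bef scores [] (by simp)).imp
    (fun hab => bef_false_Rord hab)

-- the second component of A's loop as a recursion (running max in the 1st arg)
def gcount (target : Int) : Int → List (Int × Int) → Int
  | _, [] => 0
  | m, s :: l =>
      (if m ≤ s.2 then (if s.1 + s.2 > target then 1 else 0) else 0) +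
        gcount target (max m s.2) l

lemma foldl_snd (target : Int) (l : List (Int × Int)) :
    ∀ m c : Int,
      (l.foldl (fun (st : Int × Int) sc =>
          if st.1 ≤ sc.2 then
            (sc.2, if sc.1 + sc.2 > target then st.2 + 1 else st.2)
          else st) (m, c)).2 = c + gcount target m l := by
  induction l with
  | nil => intro m c; simp [gcount]
  | cons s l ih =>
    intro m c
    by_cases hm : m ≤ s.2
    · have hmax : max m s.2 = s.2 := max_eq_right hm
      by_cases ht : s.1 + s.2 > target
      · simp only [List.foldl_cons, if_pos hm, if_pos ht, gcount, hmax, ih]; ring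
      · simp only [List.foldl_cons, if_pos hm, if_neg ht, gcount, hmax, ih]; ring
    · have hmax : max m s.2 = m := max_eq_left (le_of_lt (lt_of_not_ge hm))
      simp only [List.foldl_cons, if_neg hm, gcount, hmax, ih]; ring

-- "nonnegative second score and globally undominated" — what A's loop test means
def Pb0 (scores : List (Int × Int)) (s : Int × Int) : Bool :=
  decide (0 ≤ s.2) &&
    !(scores.any (fun z => decide (z.1 > s.1) && decide (z.2 > s.2)))

-- B's predicate with the extra 0 ≤ snd that A's loop enforces
def Pb (scores : List (Int × Int)) (target : Int) (s : Int × Int) : Bool :=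
  Pb0 scores s && decide (s.1 + s.2 > target)

lemma Pb0_iff (scores : List (Int × Int)) (s : Int × Int) :
    Pb0 scores s = true ↔ 0 ≤ s.2 ∧ ∀ z ∈ scores, ¬(z.1 > s.1 ∧ z.2 > s.2) := by
  rw [Pb0, Bool.and_eq_true, decide_eq_true_eq, Bool.not_eq_true', List.any_eq_false]
  constructor
  · rintro ⟨h0, h⟩
    exact ⟨h0, fun z hz => decide_and_false (h z hz)⟩
  · rintro ⟨h0, h⟩
    exact ⟨h0, fun z hz => decide_and_false_of_not (h z hz)⟩

-- the core invariant: A's running-max loop over the sorted list counts exactly Pb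
lemma gcount_eq_countP (scores : List (Int × Int)) (target : Int) :
    ∀ (l : List (Int × Int)) (m : Int),
      l.Pairwise Rord →
      (∀ x ∈ l, x ∈ scores) →
      0 ≤ m →
      (∀ u ∈ l, Pb0 scores u = true → m ≤ u.2) →
      (∀ u ∈ l, ∀ z ∈ scores, z.1 > u.1 → z.2 > u.2 → z ∈ l ∨ z.2 ≤ m) →
      gcount target m l = ((l.countP (Pb scores target) : Nat) : Int) := by
  intro l
  induction l with
  | nil => intro m _ _ _ _ _; simp [gcount]
  | cons s l ih =>
    intro m hpw hmem hm0 hlow hdom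
    rcases List.pairwise_cons.mp hpw with ⟨hs_l, hpw'⟩
    have hs_scores : s ∈ scores := hmem s (List.mem_cons_self ..)
    -- A's loop test on the head means exactly Pb0
    have hhead : (m ≤ s.2) ↔ Pb0 scores s = true := by
      rw [Pb0_iff]
      constructor
      · intro hms
        refine ⟨le_trans hm0 hms, ?_⟩
        rintro z hz ⟨hz1, hz2⟩
        rcases hdom s (List.mem_cons_self ..) z hz hz1 hz2 with hzl | hzm
        · rcases List.mem_cons.mp hzl with rfl | hzl'
          · omega
          · rcases hs_l z hzl' with ⟨ha, hb⟩; omega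
        · omega
      · intro h; exact hlow s (List.mem_cons_self ..) ((Pb0_iff scores s).mpr h)
    -- invariants for the tail with the new running max
    have hmem' : ∀ x ∈ l, x ∈ scores := fun x hx => hmem x (List.mem_cons_of_mem _ hx)
    have hm0' : 0 ≤ max m s.2 := le_trans hm0 (le_max_left _ _)
    have hlow' : ∀ u ∈ l, Pb0 scores u = true → max m s.2 ≤ u.2 := by
      intro u hu hpb
      rcases (Pb0_iff scores u).mp hpb with ⟨h0, hno⟩
      have h1 : m ≤ u.2 := hlow u (List.mem_cons_of_mem _ hu) hpb
      have h2 : s.2 ≤ u.2 := by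
        by_contra hlt
        rcases hs_l u hu with ⟨ha, hb⟩
        have hsu1 : s.1 > u.1 := by omega
        exact hno s hs_scores ⟨hsu1, by omega⟩
      omega
    have hdom' : ∀ u ∈ l, ∀ z ∈ scores, z.1 > u.1 → z.2 > u.2 →
        z ∈ l ∨ z.2 ≤ max m s.2 := by
      intro u hu z hz h1 h2
      rcases hdom u (List.mem_cons_of_mem _ hu) z hz h1 h2 with hzl | hzm
      · rcases List.mem_cons.mp hzl with rfl | hzl'
        · right; exact le_max_right _ _
        · left; exact hzl'
      · right; exact le_trans hzm (le_max_left _ _)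
    have hrec := ih (max m s.2) hpw' hmem' hm0' hlow' hdom'
    have hcnt : (s :: l).countP (Pb scores target) =
        l.countP (Pb scores target) + (if Pb scores target s = true then 1 else 0) :=
      List.countP_cons
    by_cases hb0 : Pb0 scores s = true
    · have hms : m ≤ s.2 := hhead.mpr hb0
      by_cases ht : s.1 + s.2 > target
      · have hpb : Pb scores target s = true := by simp [Pb, hb0, ht]
        simp only [gcount, if_pos hms, if_pos ht, hrec, hcnt, hpb]
        push_cast; ring
      · have hpb : Pb scores target s = false := by simp [Pb, hb0, ht]
        simp only [gcount, if_pos hms, if_neg ht, hrec, hcnt, hpb]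
        push_cast; ring
    · have hms : ¬ m ≤ s.2 := fun h => hb0 (hhead.mp h)
      have hpb : Pb scores target s = false := by
        simp only [Pb, Bool.and_eq_false_iff]; left; simpa using hb0
      simp only [gcount, if_neg hms, hrec, hcnt, hpb]
      push_cast; ring

-- A on a non-empty list whose guard is off: 1 + count of Pb
lemma solution_eq_count (s0 : Int × Int) (rest : List (Int × Int))
    (hg : (s0 :: rest).any
        (fun sc => decide (sc.1 > s0.1) && decide (sc.2 > s0.2)) = false) :
    solution (s0 :: rest) =
      (((s0 :: rest).countP (Pb (s0 :: rest) (s0.1 + s0.2)) : Nat) : Int) + 1 := by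
  have hget : PySem.List.pyGet? (s0 :: rest) 0 = some s0 := by
    simp [PySem.List.pyGet?, PySem.List.pyIdx?]
  have hperm := PySem.List.sorted2_perm (s0 :: rest)
    (fun x : Int × Int => -x.1) (fun x : Int × Int => x.2) false
  have hcount := gcount_eq_countP (s0 :: rest) (s0.1 + s0.2)
    (PySem.List.sorted2 (s0 :: rest) (fun x => -x.1) (fun x => x.2)) 0
    (sorted2_pairwise_Rord (s0 :: rest))
    (fun x hx => hperm.mem_iff.mp hx)
    le_rfl
    (fun u _ hpb => ((Pb0_iff _ u).mp hpb).1)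
    (fun u _ z hz _ _ => Or.inl (hperm.mem_iff.mpr hz))
  simp only [solution, hget, hg, Bool.false_eq_true, if_false,
    foldl_snd, hcount, hperm.countP_eq, zero_add]

-- B on a non-empty list whose guard is off
lemma solution_alt_eq_count (s0 : Int × Int) (rest : List (Int × Int))
    (hg : (s0 :: rest).any
        (fun sc => decide (sc.1 > s0.1) && decide (sc.2 > s0.2)) = false) :
    solution_alt (s0 :: rest) =
      1 + (((s0 :: rest).countP
        (fun p => decide (p.1 + p.2 > s0.1 + s0.2) &&
          !((s0 :: rest).any (fun z => decide (z.1 > p.1) && decide (z.2 > p.2)))) : Nat) : Int) := by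
  simp only [solution_alt, hg, Bool.false_eq_true, if_false]

-- ===== VERDICT (by name: the statement is the Claim_ definition above) =====
theorem solution_spec : Claim_unchanged_solution := by
  intro scores _ hpre hnd
  match scores with
  | [] => exact absurd rfl hpre
  | s0 :: rest =>
    by_cases hg : (s0 :: rest).any
        (fun sc => decide (sc.1 > s0.1) && decide (sc.2 > s0.2)) = true
    · have hget : PySem.List.pyGet? (s0 :: rest) 0 = some s0 := by
        simp [PySem.List.pyGet?, PySem.List.pyIdx?]
      simp only [solution, solution_alt, hget, hg, if_true]
    · have hg' := Bool.eq_false_iff.mpr hg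
      rw [solution_eq_count s0 rest hg', solution_alt_eq_count s0 rest hg']
      have hguard : ∀ z ∈ s0 :: rest, ¬(z.1 > s0.1 ∧ z.2 > s0.2) := by
        intro z hz hzc
        exact decide_and_false (List.any_eq_false.mp hg' z hz) hzc
      have hpt : ∀ p ∈ s0 :: rest, Pb (s0 :: rest) (s0.1 + s0.2) p =
          (decide (p.1 + p.2 > s0.1 + s0.2) &&
            !((s0 :: rest).any (fun z => decide (z.1 > p.1) && decide (z.2 > p.2)))) := by
        intro p hp
        by_cases h0 : 0 ≤ p.2
        · simp [Pb, Pb0, h0, Bool.and_comm]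
        · have hneg : p.2 < 0 := by omega
          have hPb : Pb (s0 :: rest) (s0.1 + s0.2) p = false := by
            simp only [Pb, Pb0, Bool.and_eq_false_iff]
            left; left; simpa using h0
          rw [hPb]
          by_cases hsum : p.1 + p.2 > s0.1 + s0.2
          · by_cases hund : ((s0 :: rest).any
                (fun z => decide (z.1 > p.1) && decide (z.2 > p.2))) = true
            · simp [hund]
            · exfalso
              apply hnd
              refine ⟨s0, by simp, hguard, p, hp, hneg, hsum, ?_⟩
              intro z hz hzc
              exact decide_and_false
                (List.any_eq_false.mp (Bool.eq_false_iff.mpr hund) z hz) hzc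
          · simp [hsum]
      rw [List.countP_congr (fun x hx => by rw [hpt x hx])]
      omega

theorem solution_changed : Claim_changed_solution := by
  unfold Claim_changed_solution; decide

lemma countP_lt_of_witness {α : Type} (P Q : α → Bool) (l : List α)
    (hmono : ∀ x ∈ l, P x = true → Q x = true) (s : α) (hs : s ∈ l)
    (hPs : P s = false) (hQs : Q s = true) : l.countP P < l.countP Q := by
  rcases List.append_of_mem hs with ⟨l1, l2, rfl⟩
  rw [List.countP_append, List.countP_append, List.countP_cons, List.countP_cons,
    hPs, hQs]
  have h1 : l1.countP P ≤ l1.countP Q :=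
    List.countP_mono_left (fun x hx => hmono x (by simp [hx]))
  have h2 : l2.countP P ≤ l2.countP Q :=
    List.countP_mono_left (fun x hx => hmono x (by simp [hx]))
  simp only [Bool.false_eq_true, if_false, if_true]
  omega

theorem solution_tight : Claim_exact_solution := by
  intro scores _ hpre hd
  match scores with
  | [] => exact absurd rfl hpre
  | s0 :: rest =>
    rcases hd with ⟨t0, ht0, hguard, s, hs, hsneg, hssum, hsund⟩
    have ht0' : s0 = t0 := Eq.symm (by simpa using ht0)
    subst ht0'
    have hg' : (s0 :: rest).any
        (fun sc => decide (sc.1 > s0.1) && decide (sc.2 > s0.2)) = false := by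
      apply List.any_eq_false.mpr
      intro z hz
      exact decide_and_false_of_not (hguard z hz)
    rw [solution_eq_count s0 rest hg', solution_alt_eq_count s0 rest hg']
    -- the B-side predicate
    set Q : Int × Int → Bool := fun p => decide (p.1 + p.2 > s0.1 + s0.2) &&
      !((s0 :: rest).any (fun z => decide (z.1 > p.1) && decide (z.2 > p.2))) with hQ
    have hmono : ∀ x ∈ s0 :: rest, Pb (s0 :: rest) (s0.1 + s0.2) x = true → Q x = true := by
      intro x _ hx
      simp only [Pb, Pb0, Bool.and_eq_true, decide_eq_true_eq] at hx
      simp only [hQ, Bool.and_eq_true, decide_eq_true_eq]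
      exact ⟨hx.2, hx.1.2⟩
    have hQs : Q s = true := by
      simp only [hQ, Bool.and_eq_true, decide_eq_true_eq, Bool.not_eq_true',
        List.any_eq_false]
      refine ⟨hssum, ?_⟩
      intro z hz
      exact hsund z hz
    have hPs : Pb (s0 :: rest) (s0.1 + s0.2) s = false := by
      simp only [Pb, Pb0, Bool.and_eq_false_iff]
      left; left; simp; omega
    have hlt : (s0 :: rest).countP (Pb (s0 :: rest) (s0.1 + s0.2)) <
        (s0 :: rest).countP Q :=
      countP_lt_of_witness _ _ _ hmono s hs hPs hQs
    intro heq
    omega
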